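-- pv_equiv track=rewrite | github.com/srinathalla/python | algo/greedy/maxNestingDepth.py | maxDepthAfterSplit
-- ===== SOURCE A (Python) =====
-- from typing import List
--
-- def maxDepthAfterSplit(s: str) -> List[int]:
--     groups = []
--     d = 0
--     for c in s:
--         open = c == '('
--         if open:
--             d += 1
--         # group determined through parity (odd/even?) of depth
--         groups.append(d % 2)
--         if not open:
--             d -= 1
--
--     return groups
-- ===== SOURCE B (Python) =====
-- from typing import List
--
-- def maxDepthAfterSplit(s: str) -> List[int]:
--     return [(i & 1) ^ (c == '(') for i, c in enumerate(s)]
-- ===== Notes on version B (the rewrite author's own statement) =====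
-- stated objective: idiomatic
-- what changed: Replaced the stateful running-depth loop by a stateless one-line comprehension computing each label directly as (i & 1) ^ (c == '('), using the invariant that the depth before step i always has the parity of i.
import Mathlib
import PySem

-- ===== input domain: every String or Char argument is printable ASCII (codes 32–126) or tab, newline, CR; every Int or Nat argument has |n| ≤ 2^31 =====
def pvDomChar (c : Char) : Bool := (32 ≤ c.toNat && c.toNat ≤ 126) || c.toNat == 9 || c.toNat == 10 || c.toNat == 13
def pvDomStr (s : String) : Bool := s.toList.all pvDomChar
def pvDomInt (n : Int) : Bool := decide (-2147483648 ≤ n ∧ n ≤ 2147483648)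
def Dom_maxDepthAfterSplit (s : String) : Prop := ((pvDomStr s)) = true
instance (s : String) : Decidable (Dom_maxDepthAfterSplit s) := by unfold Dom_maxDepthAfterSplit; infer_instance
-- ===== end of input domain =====

-- B replaces A's running-depth loop by a stateless per-character formula (i & 1) ^ (c == '(')  (idiomatic one-liner).

-- ===== PORT A =====
-- stateful loop: d is incremented before appending on '(', decremented after appending otherwise
def maxDepthAfterSplit (s : String) : List Int :=
  (s.toList.foldl
    (fun (st : List Int × Int) (c : Char) =>
      let isOpen := c = '('
      let d := if isOpen then st.2 + 1 else st.2
      let groups := st.1 ++ [PySem.Int.mod d 2]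
      let d' := if isOpen then d else d - 1
      (groups, d'))
    ([], 0)).1

-- ===== PORT B =====
def maxDepthAfterSplit_alt (s : String) : List Int :=
  (PySem.List.enumerate s.toList).map
    (fun ic => PySem.Int.bxor (PySem.Int.band ic.1 1) (if ic.2 = '(' then 1 else 0))

-- ===== PRECONDITION & SPEC =====
def Spec_maxDepthAfterSplit (s : String) (out : List Int) : Prop := out = maxDepthAfterSplit_alt s
instance (s : String) (out : List Int) : Decidable (Spec_maxDepthAfterSplit s out) := by unfold Spec_maxDepthAfterSplit; infer_instance

-- ===== CLAIM (what is proved, stated in full; the proofs are below) =====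
def Claim_equal_maxDepthAfterSplit : Prop := ∀ (s : String), Dom_maxDepthAfterSplit s → Spec_maxDepthAfterSplit s (maxDepthAfterSplit s)

-- ===== LEMMAS AND PROOFS =====

-- i & 1 is i's parity (Python band on any Int; divisor 2 is positive so mod = emod)
lemma pv_and_one (i : Int) : PySem.Int.band i 1 = i % 2 := by
  rw [PySem.Int.band_one, PySem.Int.mod_eq_emod_of_pos (b := 2) (by norm_num)]

-- loop invariant: the pre-increment depth d has the parity of the index i
lemma pv_loop (l : List Char) (acc : List Int) (d i : Int) (hi : 0 ≤ i)
    (hpar : d % 2 = i % 2) :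
    (l.foldl
      (fun (st : List Int × Int) (c : Char) =>
        (st.1 ++ [PySem.Int.mod (if c = '(' then st.2 + 1 else st.2) 2],
          if c = '(' then (if c = '(' then st.2 + 1 else st.2) else (if c = '(' then st.2 + 1 else st.2) - 1))
      (acc, d)).1
    = acc ++ (PySem.List.enumerate l i).map
        (fun ic => PySem.Int.bxor (PySem.Int.band ic.1 1) (if ic.2 = '(' then 1 else 0)) := by
  induction l generalizing acc d i with
  | nil => simp [PySem.List.enumerate_nil]
  | cons c l ih =>
    rw [PySem.List.enumerate_cons]
    simp only [List.foldl_cons, List.map_cons]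
    have hx0 : PySem.Int.bxor 0 1 = 1 := by decide
    have hand := pv_and_one i
    by_cases hc : c = '('
    · simp only [if_pos hc]
      rw [ih (acc ++ [PySem.Int.mod (d + 1) 2]) (d + 1) (i + 1) (by omega) (by omega)]
      rcases Int.emod_two_eq_zero_or_one i with h2 | h2 <;>
        simp [List.append_assoc, hand, h2, hx0] <;> omega
    · simp only [if_neg hc]
      rw [ih (acc ++ [PySem.Int.mod d 2]) (d - 1) (i + 1) (by omega) (by omega)]
      rcases Int.emod_two_eq_zero_or_one i with h2 | h2 <;>
        simp [List.append_assoc, hand, h2] <;> omega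

-- ===== VERDICT (by name: the statement is the Claim_ definition above) =====
theorem maxDepthAfterSplit_spec : Claim_equal_maxDepthAfterSplit := by
  intro s _
  unfold Spec_maxDepthAfterSplit maxDepthAfterSplit maxDepthAfterSplit_alt
  exact pv_loop s.toList [] 0 0 le_rfl rfl
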